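-- pv_equiv track=rewrite | github.com/Nontrust/coding-test | .idea/inflearn/5_greedy/4. 카드 점수[O(n)].py | solution
-- ===== SOURCE A (Python) =====
-- def solution(nums, k):
--     answer = 0
--     n = len(nums)
--
--     for i in range(k):
--         answer += nums[n-1-i]
--         print
--     temp = answer
--     start = n-k
--
--     for j in range(k):
--         temp += nums[j]
--         temp -= nums[start+j]
--
--         answer = max(answer, temp)
--
--     return answer
-- ===== SOURCE B (Python) =====
-- def solution(nums, k):
--     n = len(nums)
--     left = [0] * (k + 1)      # left[i]  = sum of the first i cards
--     for i in range(k):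
--         left[i + 1] = left[i] + nums[i]
--     right = [0] * (k + 1)     # right[j] = sum of the last j cards
--     for j in range(k):
--         right[j + 1] = right[j] + nums[n - 1 - j]
--     return max((left[i] + right[k - i] for i in range(k + 1)), default=0)
-- ===== Notes on version B (the rewrite author's own statement) =====
-- stated objective: simpler
-- what changed: B precomputes prefix/suffix sum tables and takes the max of left[i]+right[k-i] over all splits, instead of A's incremental slide-one-card window that updates a running temp.
import Mathlib
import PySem

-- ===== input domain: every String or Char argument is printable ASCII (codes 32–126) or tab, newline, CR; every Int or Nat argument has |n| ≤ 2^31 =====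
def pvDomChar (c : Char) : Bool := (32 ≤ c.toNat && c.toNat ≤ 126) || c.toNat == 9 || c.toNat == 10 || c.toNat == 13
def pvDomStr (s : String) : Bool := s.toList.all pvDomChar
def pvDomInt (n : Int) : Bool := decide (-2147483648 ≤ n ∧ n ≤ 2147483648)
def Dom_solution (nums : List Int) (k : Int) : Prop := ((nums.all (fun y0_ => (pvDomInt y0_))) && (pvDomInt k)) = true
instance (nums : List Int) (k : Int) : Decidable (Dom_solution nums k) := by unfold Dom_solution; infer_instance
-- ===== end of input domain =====

-- B replaces A's incremental slide-one-card window by prefix/suffix sum tables plus a max over all splits (simpler decomposition, same cost).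


-- ===== PORT A =====
def solution (nums : List Int) (k : Int) : Int :=
  let n : Int := (nums.length : Int)
  let answer : Int := (PySem.List.pyRange 0 k 1).foldl
      (fun a i => a + PySem.List.pyGetD nums (n - 1 - i) 0) 0
  let start : Int := n - k
  let p : Int × Int := (PySem.List.pyRange 0 k 1).foldl
      (fun (s : Int × Int) j =>
        let temp := s.2 + PySem.List.pyGetD nums j 0 - PySem.List.pyGetD nums (start + j) 0
        (max s.1 temp, temp)) (answer, answer)
  p.1

-- ===== PORT B =====
def solution_alt (nums : List Int) (k : Int) : Int :=
  let n : Int := (nums.length : Int)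
  let left : List Int := (PySem.List.pyRange 0 k 1).foldl
      (fun L i => L ++ [PySem.List.pyGetD L i 0 + PySem.List.pyGetD nums i 0]) [0]
  let right : List Int := (PySem.List.pyRange 0 k 1).foldl
      (fun R j => R ++ [PySem.List.pyGetD R j 0 + PySem.List.pyGetD nums (n - 1 - j) 0]) [0]
  let cands : List Int := (PySem.List.pyRange 0 (k + 1) 1).map
      (fun i => PySem.List.pyGetD left i 0 + PySem.List.pyGetD right (k - i) 0)
  (PySem.List.max? cands (fun x => x)).getD 0

-- ===== PRECONDITION & SPEC =====
-- Pre_ excludes exactly the inputs with k > len(nums), on which Python A raises IndexError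
-- (the second loop reads nums[j] at j = len(nums)); negative k stays inside (both return 0).
def Pre_solution (nums : List Int) (k : Int) : Prop := k ≤ (nums.length : Int) ∨ k < 0
instance (nums : List Int) (k : Int) : Decidable (Pre_solution nums k) := by unfold Pre_solution; infer_instance
def pvWitness_solution : List Int × Int := ([1, 2, 3, 1], 2)
def Spec_solution (nums : List Int) (k : Int) (out : Int) : Prop := out = solution_alt nums k
instance (nums : List Int) (k : Int) (out : Int) : Decidable (Spec_solution nums k out) := by unfold Spec_solution; infer_instance

-- ===== CLAIM (what is proved, stated in full; the proofs are below) =====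
def Claim_equal_solution : Prop := ∀ (nums : List Int) (k : Int), Dom_solution nums k → Pre_solution nums k → Spec_solution nums k (solution nums k)

-- ===== LEMMAS AND PROOFS =====

-- sum of the first j elements
def pvPre (nums : List Int) (j : Nat) : Int := (nums.take j).sum
-- sum of the last j elements
def pvSuf (nums : List Int) (j : Nat) : Int := (nums.reverse.take j).sum
-- candidate value of the split "first j from the left, the rest of the k from the right"
def pvG (nums : List Int) (m j : Nat) : Int := pvPre nums j + pvSuf nums (m - j)

theorem pvPre_succ (nums : List Int) (j : Nat) (h : j < nums.length) :
    pvPre nums (j + 1) = pvPre nums j + PySem.List.pyGetD nums (j : Int) 0 := by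
  have hg : PySem.List.pyGetD nums ((j : Nat) : Int) 0 = nums[j] := by
    rw [PySem.List.pyGetD_natCast]
    exact List.getD_eq_getElem _ _ h
  rw [pvPre, pvPre, hg]
  exact List.sum_take_succ nums j h

theorem pvSuf_succ (nums : List Int) (j : Nat) (h : j < nums.length) :
    pvSuf nums (j + 1) = pvSuf nums j +
      PySem.List.pyGetD nums ((nums.length : Int) - 1 - (j : Int)) 0 := by
  have hj : j < nums.reverse.length := by simpa using h
  have hidx : PySem.List.pyGetD nums ((nums.length : Int) - 1 - (j : Int)) 0
      = nums[nums.length - 1 - j]'(by omega) := by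
    have := PySem.List.pyGetD_eq_getElem nums (i := (nums.length : Int) - 1 - (j : Int)) 0
      (by omega) (by omega)
    rw [this]; congr 1; omega
  simp [pvSuf, List.take_succ, List.getElem?_eq_getElem hj, hidx, List.getElem_reverse]

theorem pvA1 (nums : List Int) (m : Nat) (hm : m ≤ nums.length) :
    (PySem.List.pyRange 0 (m : Int) 1).foldl
      (fun a i => a + PySem.List.pyGetD nums ((nums.length : Int) - 1 - i) 0) 0
    = pvSuf nums m := by
  induction m with
  | zero => simp [PySem.List.pyRange_one_eq_nil, pvSuf]
  | succ j ih =>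
      push_cast
      rw [PySem.List.pyRange_one_succ_right (by positivity : (0:Int) ≤ (j : Int))]
      rw [List.foldl_append, ih (by omega)]
      simp [pvSuf_succ nums j (by omega)]

theorem pvA2 (nums : List Int) (m j : Nat) (hj : j ≤ m) (hm : m ≤ nums.length) :
    (PySem.List.pyRange 0 (j : Int) 1).foldl
      (fun (s : Int × Int) i =>
        (max s.1 (s.2 + PySem.List.pyGetD nums i 0
            - PySem.List.pyGetD nums ((nums.length : Int) - (m : Int) + i) 0),
         s.2 + PySem.List.pyGetD nums i 0
            - PySem.List.pyGetD nums ((nums.length : Int) - (m : Int) + i) 0))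
      (pvSuf nums m, pvSuf nums m)
    = (((List.range j).map (fun i => pvG nums m (i + 1))).foldl max (pvG nums m 0),
       pvG nums m j) := by
  induction j with
  | zero => simp [pvG, pvPre, pvSuf]
  | succ i ih =>
      push_cast
      rw [PySem.List.pyRange_one_succ_right (by positivity : (0:Int) ≤ (i : Int))]
      rw [List.foldl_append, ih (by omega)]
      have hstep : pvG nums m i + PySem.List.pyGetD nums (i : Int) 0
          - PySem.List.pyGetD nums ((nums.length : Int) - (m : Int) + (i : Int)) 0
          = pvG nums m (i + 1) := by
        have h1 : pvPre nums (i + 1) = pvPre nums i + PySem.List.pyGetD nums (i : Int) 0 :=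
          pvPre_succ nums i (by omega)
        have h2 : pvSuf nums (m - i) = pvSuf nums (m - i - 1)
            + PySem.List.pyGetD nums ((nums.length : Int) - 1 - ((m - i - 1 : Nat) : Int)) 0 := by
          have := pvSuf_succ nums (m - i - 1) (by omega)
          rw [show m - i - 1 + 1 = m - i by omega] at this
          exact this
        have hcast : (nums.length : Int) - 1 - ((m - i - 1 : Nat) : Int)
            = (nums.length : Int) - (m : Int) + (i : Int) := by
          have : ((m - i - 1 : Nat) : Int) = (m : Int) - (i : Int) - 1 := by push_cast; omega
          omega
        have hmm : m - (i + 1) = m - i - 1 := by omega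
        rw [hcast] at h2
        simp only [pvG, hmm, h1]
        omega
      simp only [List.range_succ, List.map_append, List.map_cons, List.map_nil,
        List.foldl_append, List.foldl_cons, List.foldl_nil]
      rw [hstep]

theorem pvBleft (nums : List Int) (m : Nat) (hm : m ≤ nums.length) :
    (PySem.List.pyRange 0 (m : Int) 1).foldl
      (fun L i => L ++ [PySem.List.pyGetD L i 0 + PySem.List.pyGetD nums i 0]) [0]
    = (List.range (m + 1)).map (fun i => pvPre nums i) := by
  induction m with
  | zero => simp [PySem.List.pyRange_one_eq_nil, pvPre]
  | succ j ih =>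
      push_cast
      rw [PySem.List.pyRange_one_succ_right (by positivity : (0:Int) ≤ (j : Int))]
      rw [List.foldl_append, ih (by omega)]
      simp [List.range_succ, pvPre_succ nums j (by omega)]

theorem pvBright (nums : List Int) (m : Nat) (_hm : m ≤ nums.length) :
    (PySem.List.pyRange 0 (m : Int) 1).foldl
      (fun R j => R ++ [PySem.List.pyGetD R j 0
        + PySem.List.pyGetD nums ((nums.length : Int) - 1 - j) 0]) [0]
    = (List.range (m + 1)).map (fun j => pvSuf nums j) := by
  induction m with
  | zero => simp [PySem.List.pyRange_one_eq_nil, pvSuf]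
  | succ j ih =>
      push_cast
      rw [PySem.List.pyRange_one_succ_right (by positivity : (0:Int) ≤ (j : Int))]
      rw [List.foldl_append, ih (by omega)]
      simp [List.range_succ, pvSuf_succ nums j (by omega)]

theorem pvB_cands (nums : List Int) (m : Nat) (_hm : m ≤ nums.length) :
    (PySem.List.pyRange 0 ((m : Int) + 1) 1).map
      (fun i => PySem.List.pyGetD ((List.range (m + 1)).map (fun i => pvPre nums i)) i 0
        + PySem.List.pyGetD ((List.range (m + 1)).map (fun j => pvSuf nums j)) ((m : Int) - i) 0)
    = (List.range (m + 1)).map (fun i => pvG nums m i) := by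
  rw [show ((m : Int) + 1) = ((m + 1 : Nat) : Int) by push_cast; ring,
      PySem.List.pyRange_zero_natCast]
  rw [List.map_map]
  apply List.map_congr_left
  intro i hi
  have hi' : i < m + 1 := List.mem_range.mp hi
  have h1 : PySem.List.pyGetD ((List.range (m + 1)).map (fun i => pvPre nums i)) ((i : Nat) : Int) 0
      = pvPre nums i := by
    rw [PySem.List.pyGetD_natCast, List.getD_eq_getElem _ _ (by simp only [List.length_map, List.length_range]; omega)]
    simp
  have h2 : PySem.List.pyGetD ((List.range (m + 1)).map (fun j => pvSuf nums j)) ((m : Int) - (i : Int)) 0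
      = pvSuf nums (m - i) := by
    rw [show (m : Int) - (i : Int) = ((m - i : Nat) : Int) by push_cast; omega]
    rw [PySem.List.pyGetD_natCast, List.getD_eq_getElem _ _ (by simp only [List.length_map, List.length_range]; omega)]
    simp
  simp only [Function.comp]
  rw [h1, h2]
  rfl

theorem pv_main (nums : List Int) (m : Nat) (hm : m ≤ nums.length) :
    solution nums (m : Int) = solution_alt nums (m : Int) := by
  unfold solution solution_alt
  simp only []
  rw [pvA1 nums m hm]
  have hA := pvA2 nums m m (le_refl m) hm
  rw [pvBleft nums m hm, pvBright nums m hm, pvB_cands nums m hm]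
  -- A side
  have hAfst : ((PySem.List.pyRange 0 (m : Int) 1).foldl
      (fun (s : Int × Int) j =>
        (max s.1 (s.2 + PySem.List.pyGetD nums j 0
            - PySem.List.pyGetD nums ((nums.length : Int) - (m : Int) + j) 0),
         s.2 + PySem.List.pyGetD nums j 0
            - PySem.List.pyGetD nums ((nums.length : Int) - (m : Int) + j) 0))
      (pvSuf nums m, pvSuf nums m)).1
      = ((List.range m).map (fun i => pvG nums m (i + 1))).foldl max (pvG nums m 0) := by
    rw [pvA2 nums m m (le_refl m) hm]
  -- B side: max over the candidate list
  have hBmax : (PySem.List.max? ((List.range (m + 1)).map (fun i => pvG nums m i)) (fun x => x)).getD 0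
      = ((List.range m).map (fun i => pvG nums m (i + 1))).foldl max (pvG nums m 0) := by
    rw [List.range_succ_eq_map, List.map_cons, PySem.List.max?_id_cons]
    simp [List.map_map, Function.comp_def]
  rw [hBmax]
  exact hAfst

-- ===== VERDICT (by name: the statement is the Claim_ definition above) =====
theorem solution_spec : Claim_equal_solution := by
  intro nums k _ hpre
  unfold Spec_solution
  by_cases hk : 0 ≤ k
  · -- 0 ≤ k ≤ len: the main equivalence
    have hkn : k ≤ (nums.length : Int) := by
      rcases hpre with h | h
      · exact h
      · omega
    have hkeq : k = ((k.toNat : Nat) : Int) := by omega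
    rw [hkeq]
    exact pv_main nums k.toNat (by omega)
  · -- k < 0: both sides are 0 (empty ranges)
    unfold solution solution_alt
    rw [PySem.List.pyRange_one_eq_nil (by omega : k ≤ 0),
        PySem.List.pyRange_one_eq_nil (by omega : (k + 1 : Int) ≤ 0)]
    simp [PySem.List.max?]
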